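-- pv_equiv track=rewrite | github.com/Zsmboom/bazi | docs/newbazi_with_sxtwl.py | get_shichen
-- ===== SOURCE A (Python) =====
-- DIZHI = ["子", "丑", "寅", "卯", "辰", "巳", "午", "未", "申", "酉", "戌", "亥"]
--
-- def get_shichen(hour, minute):
--     total = hour * 60 + minute
--     for i, zhi in enumerate(DIZHI):
--         start = (i * 2 % 24) * 60
--         end = ((i * 2 + 2) % 24) * 60
--         if start < end:
--             if start <= total < end:
--                 return zhi
--         else:
--             if total >= start or total < end:
--                 return zhi
--     return "子"
-- ===== SOURCE B (Python) =====
-- DIZHI = ["子", "丑", "寅", "卯", "辰", "巳", "午", "未", "申", "酉", "戌", "亥"]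
--
-- def get_shichen(hour, minute):
--     idx = (hour * 60 + minute) // 120
--     return DIZHI[idx] if 0 <= idx < 12 else "亥"
-- ===== Notes on version B (the rewrite author's own statement) =====
-- stated objective: simpler
-- what changed: Replaced the 12-interval scan with a single floor-division index (total // 120) into DIZHI, with out-of-range totals mapped to "亥" as in A's wrap-around branch.
import Mathlib
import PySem

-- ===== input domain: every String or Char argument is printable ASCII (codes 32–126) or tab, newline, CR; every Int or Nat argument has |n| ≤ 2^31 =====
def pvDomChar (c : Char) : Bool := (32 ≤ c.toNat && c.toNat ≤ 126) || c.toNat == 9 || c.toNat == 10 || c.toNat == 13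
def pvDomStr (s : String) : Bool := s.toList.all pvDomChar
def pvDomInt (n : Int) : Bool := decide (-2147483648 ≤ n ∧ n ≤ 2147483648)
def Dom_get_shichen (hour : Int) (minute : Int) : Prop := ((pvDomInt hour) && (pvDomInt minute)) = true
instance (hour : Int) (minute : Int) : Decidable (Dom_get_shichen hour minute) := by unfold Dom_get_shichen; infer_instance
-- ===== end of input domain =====

-- B replaces A's scan of 12 two-hour intervals by one floor-division index into DIZHI (simpler).

def DIZHI : List String := ["子", "丑", "寅", "卯", "辰", "巳", "午", "未", "申", "酉", "戌", "亥"]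

-- ===== PORT A =====
-- A's for-loop over enumerate(DIZHI) with early return; fall-through returns "子".
def getShichenLoop (total : Int) : List (Int × String) → String
  | [] => "子"
  | (i, zhi) :: rest =>
      let start := (i * 2 % 24) * 60
      let stop := ((i * 2 + 2) % 24) * 60
      if start < stop then
        if start ≤ total ∧ total < stop then zhi else getShichenLoop total rest
      else
        if total ≥ start ∨ total < stop then zhi else getShichenLoop total rest

def get_shichen (hour : Int) (minute : Int) : String :=
  let total := hour * 60 + minute
  getShichenLoop total (PySem.List.enumerate DIZHI)

-- ===== PORT B =====
def get_shichen_alt (hour : Int) (minute : Int) : String :=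
  let idx := PySem.Int.floordiv (hour * 60 + minute) 120
  if 0 ≤ idx ∧ idx < 12 then (PySem.List.pyGet? DIZHI idx).getD "" else "亥"

-- ===== PRECONDITION & SPEC =====
def Spec_get_shichen (hour : Int) (minute : Int) (out : String) : Prop := out = get_shichen_alt hour minute
instance (hour : Int) (minute : Int) (out : String) : Decidable (Spec_get_shichen hour minute out) := by unfold Spec_get_shichen; infer_instance

-- ===== CLAIM (what is proved, stated in full; the proofs are below) =====
def Claim_equal_get_shichen : Prop := ∀ (hour : Int) (minute : Int), Dom_get_shichen hour minute → Spec_get_shichen hour minute (get_shichen hour minute)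

-- ===== LEMMAS AND PROOFS =====

-- one step of A's loop: the first interval misses, continue with the rest
theorem loop_skip (t : Int) (i : Int) (z : String) (rest : List (Int × String))
    (hlt : (i * 2 % 24) * 60 < ((i * 2 + 2) % 24) * 60)
    (hm : ¬((i * 2 % 24) * 60 ≤ t ∧ t < ((i * 2 + 2) % 24) * 60)) :
    getShichenLoop t ((i, z) :: rest) = getShichenLoop t rest := by
  simp only [getShichenLoop]
  rw [if_pos hlt, if_neg hm]

theorem loop_hit (t : Int) (i : Int) (z : String) (rest : List (Int × String))
    (hlt : (i * 2 % 24) * 60 < ((i * 2 + 2) % 24) * 60)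
    (hm : (i * 2 % 24) * 60 ≤ t ∧ t < ((i * 2 + 2) % 24) * 60) :
    getShichenLoop t ((i, z) :: rest) = z := by
  simp only [getShichenLoop]
  rw [if_pos hlt, if_pos hm]

theorem loop_hit_wrap (t : Int) (i : Int) (z : String) (rest : List (Int × String))
    (hlt : ¬((i * 2 % 24) * 60 < ((i * 2 + 2) % 24) * 60))
    (hm : t ≥ (i * 2 % 24) * 60 ∨ t < ((i * 2 + 2) % 24) * 60) :
    getShichenLoop t ((i, z) :: rest) = z := by
  simp only [getShichenLoop]
  rw [if_neg hlt, if_pos hm]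

set_option maxHeartbeats 1000000 in
theorem both_eq (total : Int) :
    getShichenLoop total (PySem.List.enumerate DIZHI) =
      (if 0 ≤ PySem.Int.floordiv total 120 ∧ PySem.Int.floordiv total 120 < 12 then
        (PySem.List.pyGet? DIZHI (PySem.Int.floordiv total 120)).getD "" else "亥") := by
  have hq := PySem.Int.floordiv_eq_iff_of_pos (a := total) (b := 120)
    (q := PySem.Int.floordiv total 120) (by norm_num)
  obtain ⟨h1, h2⟩ := hq.mp rfl
  have hfd : PySem.Int.floordiv total 120 = total / 120 :=
    PySem.Int.floordiv_eq_ediv_of_pos (by norm_num)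
  rw [hfd] at h1 h2 ⊢
  simp only [DIZHI, PySem.List.enumerate_cons, PySem.List.enumerate_nil]
  norm_num
  have hcase : total / 120 < 0 ∨ 12 ≤ total / 120 ∨
      total / 120 = 0 ∨
      total / 120 = 1 ∨
      total / 120 = 2 ∨
      total / 120 = 3 ∨
      total / 120 = 4 ∨
      total / 120 = 5 ∨
      total / 120 = 6 ∨
      total / 120 = 7 ∨
      total / 120 = 8 ∨
      total / 120 = 9 ∨
      total / 120 = 10 ∨
      total / 120 = 11 := by omega
  rcases hcase with h | h | h | h | h | h | h | h | h | h | h | h | h | h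
  · rw [loop_skip total 0 _ _ (by omega) (by omega),
      loop_skip total 1 _ _ (by omega) (by omega),
      loop_skip total 2 _ _ (by omega) (by omega),
      loop_skip total 3 _ _ (by omega) (by omega),
      loop_skip total 4 _ _ (by omega) (by omega),
      loop_skip total 5 _ _ (by omega) (by omega),
      loop_skip total 6 _ _ (by omega) (by omega),
      loop_skip total 7 _ _ (by omega) (by omega),
      loop_skip total 8 _ _ (by omega) (by omega),
      loop_skip total 9 _ _ (by omega) (by omega),
      loop_skip total 10 _ _ (by omega) (by omega),
      loop_hit_wrap total 11 _ _ (by omega) (by omega)]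
    rw [if_neg (by omega)]
  · rw [loop_skip total 0 _ _ (by omega) (by omega),
      loop_skip total 1 _ _ (by omega) (by omega),
      loop_skip total 2 _ _ (by omega) (by omega),
      loop_skip total 3 _ _ (by omega) (by omega),
      loop_skip total 4 _ _ (by omega) (by omega),
      loop_skip total 5 _ _ (by omega) (by omega),
      loop_skip total 6 _ _ (by omega) (by omega),
      loop_skip total 7 _ _ (by omega) (by omega),
      loop_skip total 8 _ _ (by omega) (by omega),
      loop_skip total 9 _ _ (by omega) (by omega),
      loop_skip total 10 _ _ (by omega) (by omega),
      loop_hit_wrap total 11 _ _ (by omega) (by omega)]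
    rw [if_neg (by omega)]
  · rw [loop_hit total 0 _ _ (by omega) (by omega)]
    rw [h, if_pos (by norm_num)]; rfl
  · rw [loop_skip total 0 _ _ (by omega) (by omega),
      loop_hit total 1 _ _ (by omega) (by omega)]
    rw [h, if_pos (by norm_num)]; rfl
  · rw [loop_skip total 0 _ _ (by omega) (by omega),
      loop_skip total 1 _ _ (by omega) (by omega),
      loop_hit total 2 _ _ (by omega) (by omega)]
    rw [h, if_pos (by norm_num)]; rfl
  · rw [loop_skip total 0 _ _ (by omega) (by omega),
      loop_skip total 1 _ _ (by omega) (by omega),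
      loop_skip total 2 _ _ (by omega) (by omega),
      loop_hit total 3 _ _ (by omega) (by omega)]
    rw [h, if_pos (by norm_num)]; rfl
  · rw [loop_skip total 0 _ _ (by omega) (by omega),
      loop_skip total 1 _ _ (by omega) (by omega),
      loop_skip total 2 _ _ (by omega) (by omega),
      loop_skip total 3 _ _ (by omega) (by omega),
      loop_hit total 4 _ _ (by omega) (by omega)]
    rw [h, if_pos (by norm_num)]; rfl
  · rw [loop_skip total 0 _ _ (by omega) (by omega),
      loop_skip total 1 _ _ (by omega) (by omega),
      loop_skip total 2 _ _ (by omega) (by omega),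
      loop_skip total 3 _ _ (by omega) (by omega),
      loop_skip total 4 _ _ (by omega) (by omega),
      loop_hit total 5 _ _ (by omega) (by omega)]
    rw [h, if_pos (by norm_num)]; rfl
  · rw [loop_skip total 0 _ _ (by omega) (by omega),
      loop_skip total 1 _ _ (by omega) (by omega),
      loop_skip total 2 _ _ (by omega) (by omega),
      loop_skip total 3 _ _ (by omega) (by omega),
      loop_skip total 4 _ _ (by omega) (by omega),
      loop_skip total 5 _ _ (by omega) (by omega),
      loop_hit total 6 _ _ (by omega) (by omega)]
    rw [h, if_pos (by norm_num)]; rfl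
  · rw [loop_skip total 0 _ _ (by omega) (by omega),
      loop_skip total 1 _ _ (by omega) (by omega),
      loop_skip total 2 _ _ (by omega) (by omega),
      loop_skip total 3 _ _ (by omega) (by omega),
      loop_skip total 4 _ _ (by omega) (by omega),
      loop_skip total 5 _ _ (by omega) (by omega),
      loop_skip total 6 _ _ (by omega) (by omega),
      loop_hit total 7 _ _ (by omega) (by omega)]
    rw [h, if_pos (by norm_num)]; rfl
  · rw [loop_skip total 0 _ _ (by omega) (by omega),
      loop_skip total 1 _ _ (by omega) (by omega),
      loop_skip total 2 _ _ (by omega) (by omega),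
      loop_skip total 3 _ _ (by omega) (by omega),
      loop_skip total 4 _ _ (by omega) (by omega),
      loop_skip total 5 _ _ (by omega) (by omega),
      loop_skip total 6 _ _ (by omega) (by omega),
      loop_skip total 7 _ _ (by omega) (by omega),
      loop_hit total 8 _ _ (by omega) (by omega)]
    rw [h, if_pos (by norm_num)]; rfl
  · rw [loop_skip total 0 _ _ (by omega) (by omega),
      loop_skip total 1 _ _ (by omega) (by omega),
      loop_skip total 2 _ _ (by omega) (by omega),
      loop_skip total 3 _ _ (by omega) (by omega),
      loop_skip total 4 _ _ (by omega) (by omega),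
      loop_skip total 5 _ _ (by omega) (by omega),
      loop_skip total 6 _ _ (by omega) (by omega),
      loop_skip total 7 _ _ (by omega) (by omega),
      loop_skip total 8 _ _ (by omega) (by omega),
      loop_hit total 9 _ _ (by omega) (by omega)]
    rw [h, if_pos (by norm_num)]; rfl
  · rw [loop_skip total 0 _ _ (by omega) (by omega),
      loop_skip total 1 _ _ (by omega) (by omega),
      loop_skip total 2 _ _ (by omega) (by omega),
      loop_skip total 3 _ _ (by omega) (by omega),
      loop_skip total 4 _ _ (by omega) (by omega),
      loop_skip total 5 _ _ (by omega) (by omega),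
      loop_skip total 6 _ _ (by omega) (by omega),
      loop_skip total 7 _ _ (by omega) (by omega),
      loop_skip total 8 _ _ (by omega) (by omega),
      loop_skip total 9 _ _ (by omega) (by omega),
      loop_hit total 10 _ _ (by omega) (by omega)]
    rw [h, if_pos (by norm_num)]; rfl
  · rw [loop_skip total 0 _ _ (by omega) (by omega),
      loop_skip total 1 _ _ (by omega) (by omega),
      loop_skip total 2 _ _ (by omega) (by omega),
      loop_skip total 3 _ _ (by omega) (by omega),
      loop_skip total 4 _ _ (by omega) (by omega),
      loop_skip total 5 _ _ (by omega) (by omega),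
      loop_skip total 6 _ _ (by omega) (by omega),
      loop_skip total 7 _ _ (by omega) (by omega),
      loop_skip total 8 _ _ (by omega) (by omega),
      loop_skip total 9 _ _ (by omega) (by omega),
      loop_skip total 10 _ _ (by omega) (by omega),
      loop_hit_wrap total 11 _ _ (by omega) (by omega)]
    rw [h, if_pos (by norm_num)]; rfl

-- ===== VERDICT (by name: the statement is the Claim_ definition above) =====
theorem get_shichen_spec : Claim_equal_get_shichen := by
  intro hour minute _
  unfold Spec_get_shichen get_shichen get_shichen_alt
  exact both_eq (hour * 60 + minute)
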